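-- pv_equiv track=rewrite | github.com/Tejwardhan-Patil/Anomaly-Detection-in-Time-Series-Data | models/deep_learning/lstm.py | identify_anomaly_windows
-- ===== SOURCE A (Python) =====
-- def identify_anomaly_windows(anomalies, window_size=5):
--     """
--     Identify windows of consecutive anomalies.
--
--     :param anomalies: Array of anomaly flags (True for anomaly, False otherwise)
--     :param window_size: Minimum size of consecutive anomalies to flag as an anomaly window
--     :return: List of anomaly windows (start and end indices)
--     """
--     anomaly_windows = []
--     start = None
--
--     for i, is_anomaly in enumerate(anomalies):
--         if is_anomaly and start is None:
--             start = i
--         elif not is_anomaly and start is not None: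
--             if i - start >= window_size:
--                 anomaly_windows.append((start, i))
--             start = None
--
--     if start is not None and len(anomalies) - start >= window_size:
--         anomaly_windows.append((start, len(anomalies)))
--
--     return anomaly_windows
-- ===== SOURCE B (Python) =====
-- from itertools import groupby
--
--
-- def identify_anomaly_windows(anomalies, window_size=5):
--     """Group the flags into maximal consecutive runs and keep the long True runs."""
--     windows = []
--     idx = 0
--     for key, group in groupby(anomalies, key=bool):
--         length = sum(1 for _ in group)
--         if key and length >= window_size:
--             windows.append((idx, idx + length))
--         idx += length
--     return windows
-- ===== Notes on version B (the rewrite author's own statement) =====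
-- stated objective: idiomatic
-- what changed: Replaces the nullable-start state machine with itertools.groupby partitioning into maximal runs, filtering True runs by length; the trailing run needs no separate post-loop check.
import Mathlib
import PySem

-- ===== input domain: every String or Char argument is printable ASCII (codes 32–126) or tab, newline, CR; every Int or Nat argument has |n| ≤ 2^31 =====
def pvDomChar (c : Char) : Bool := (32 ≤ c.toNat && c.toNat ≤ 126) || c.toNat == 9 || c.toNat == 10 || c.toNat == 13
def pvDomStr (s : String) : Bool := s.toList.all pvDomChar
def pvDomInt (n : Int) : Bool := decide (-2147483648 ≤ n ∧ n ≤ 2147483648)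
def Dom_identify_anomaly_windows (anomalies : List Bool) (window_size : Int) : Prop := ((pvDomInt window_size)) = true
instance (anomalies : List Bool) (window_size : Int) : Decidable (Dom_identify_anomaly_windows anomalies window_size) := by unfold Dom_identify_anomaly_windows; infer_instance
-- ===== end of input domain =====

-- B replaces A's nullable-start state machine by a groupby-style pass over maximal runs (idiomatic decomposition; same cost).


-- ===== PORT A =====
-- A's for-loop over enumerate(anomalies): state = (anomaly_windows, start), running index i.
def iawLoop (w : Int) : List Bool → Int → Option Int → List (Int × Int) → List (Int × Int) × Option Int
  | [], _, start, aw => (aw, start)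
  | a :: rest, i, start, aw =>
    if a = true ∧ start = none then
      iawLoop w rest (i + 1) (some i) aw
    else if a = false ∧ start ≠ none then
      match start with
      | some s => iawLoop w rest (i + 1) none (if i - s ≥ w then aw ++ [(s, i)] else aw)
      | none => iawLoop w rest (i + 1) start aw
    else
      iawLoop w rest (i + 1) start aw

def identify_anomaly_windows (anomalies : List Bool) (window_size : Int) : List (Int × Int) :=
  match iawLoop window_size anomalies 0 none [] with
  | (aw, some s) =>
      if (anomalies.length : Int) - s ≥ window_size then aw ++ [(s, (anomalies.length : Int))] else aw
  | (aw, none) => aw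

-- ===== PORT B =====
-- groupby: the maximal runs of equal flags, as (key, length) pairs.
def iawGroups : List Bool → List (Bool × Nat)
  | [] => []
  | b :: bs => (b, (bs.takeWhile (· == b)).length + 1) :: iawGroups (bs.dropWhile (· == b))
termination_by l => l.length
decreasing_by
  simp only [List.length_cons]
  exact Nat.lt_succ_of_le (List.length_dropWhile_le _ _)

-- B's for-loop over the groups, carrying the running start index idx.
def iawBGo (w : Int) : List (Bool × Nat) → Int → List (Int × Int)
  | [], _ => []
  | (k, n) :: gs, idx =>
    (if k = true ∧ (n : Int) ≥ w then [(idx, idx + (n : Int))] else []) ++ iawBGo w gs (idx + (n : Int))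

def identify_anomaly_windows_alt (anomalies : List Bool) (window_size : Int) : List (Int × Int) :=
  iawBGo window_size (iawGroups anomalies) 0

-- ===== PRECONDITION & SPEC =====
def Spec_identify_anomaly_windows (anomalies : List Bool) (window_size : Int) (out : List (Int × Int)) : Prop := out = identify_anomaly_windows_alt anomalies window_size
instance (anomalies : List Bool) (window_size : Int) (out : List (Int × Int)) : Decidable (Spec_identify_anomaly_windows anomalies window_size out) := by unfold Spec_identify_anomaly_windows; infer_instance

-- ===== CLAIM (what is proved, stated in full; the proofs are below) =====
def Claim_equal_identify_anomaly_windows : Prop := ∀ (anomalies : List Bool) (window_size : Int), Dom_identify_anomaly_windows anomalies window_size → Spec_identify_anomaly_windows anomalies window_size (identify_anomaly_windows anomalies window_size)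

-- ===== LEMMAS AND PROOFS =====

-- A's post-loop trailing-run check, with the end index as a parameter.
def iawFinish (w : Int) (st : List (Int × Int) × Option Int) (endIdx : Int) : List (Int × Int) :=
  match st with
  | (aw, some s) => if endIdx - s ≥ w then aw ++ [(s, endIdx)] else aw
  | (aw, none) => aw

-- A run of False flags with start = none is skipped.
theorem iawLoop_false_run (w : Int) (fs : List Bool) (hfs : ∀ x ∈ fs, x = false) :
    ∀ (r : List Bool) (i : Int) (aw : List (Int × Int)),
      iawLoop w (fs ++ r) i none aw = iawLoop w r (i + fs.length) none aw := by
  induction fs with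
  | nil => intro r i aw; simp [iawLoop]
  | cons f fs ih =>
    intro r i aw
    have hf : f = false := hfs f (by simp)
    have hfs' : ∀ x ∈ fs, x = false := fun x hx => hfs x (by simp [hx])
    simp only [List.cons_append, iawLoop, hf]
    rw [if_neg (by simp), if_neg (by simp), ih hfs' r (i + 1) aw]
    congr 1
    simp only [List.length_cons]
    push_cast
    ring

-- A run of True flags with start = some s keeps the state.
theorem iawLoop_true_run (w : Int) (ts : List Bool) (hts : ∀ x ∈ ts, x = true) :
    ∀ (r : List Bool) (i s : Int) (aw : List (Int × Int)),
      iawLoop w (ts ++ r) i (some s) aw = iawLoop w r (i + ts.length) (some s) aw := by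
  induction ts with
  | nil => intro r i s aw; simp [iawLoop]
  | cons t ts ih =>
    intro r i s aw
    have ht : t = true := hts t (by simp)
    have hts' : ∀ x ∈ ts, x = true := fun x hx => hts x (by simp [hx])
    simp only [List.cons_append, iawLoop, ht]
    rw [if_neg (by simp), if_neg (by simp), ih hts' r (i + 1) s aw]
    congr 1
    simp only [List.length_cons]
    push_cast
    ring

-- The head of dropWhile fails the predicate.
theorem head_dropWhile_false {α : Type} (p : α → Bool) :
    ∀ (l : List α) (x : α) (r : List α), l.dropWhile p = x :: r → p x = false := by
  intro l
  induction l with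
  | nil => intro x r h; simp [List.dropWhile] at h
  | cons a l ih =>
    intro x r h
    by_cases hp : p a
    · rw [List.dropWhile_cons_of_pos hp] at h
      exact ih x r h
    · rw [List.dropWhile_cons_of_neg hp] at h
      cases h
      simpa using hp

-- Main invariant: running A's loop (start = none, accumulator aw) on a suffix l whose
-- first element has global index i, then finishing at index i + |l|, equals
-- aw ++ B's group loop on the groups of l starting at idx = i.
theorem iaw_main (w : Int) : ∀ (n : ℕ) (l : List Bool), l.length ≤ n →
    ∀ (i : Int) (aw : List (Int × Int)),
      iawFinish w (iawLoop w l i none aw) (i + l.length) = aw ++ iawBGo w (iawGroups l) i := by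
  intro n
  induction n with
  | zero =>
    intro l hl i aw
    have : l = [] := List.eq_nil_of_length_eq_zero (Nat.le_zero.mp hl)
    subst this
    simp [iawLoop, iawFinish, iawGroups, iawBGo]
  | succ n ih =>
    intro l hl i aw
    match l with
    | [] => simp [iawLoop, iawFinish, iawGroups, iawBGo]
    | b :: bs =>
      have hsplit : bs.takeWhile (· == b) ++ bs.dropWhile (· == b) = bs :=
        List.takeWhile_append_dropWhile
      set ts := bs.takeWhile (· == b) with hts_def
      set rest := bs.dropWhile (· == b) with hrest_def
      have hts : ∀ x ∈ ts, x = b := by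
        intro x hx
        have := List.mem_takeWhile_imp hx
        simpa using this
      have hlen_bs : ts.length + rest.length = bs.length := by
        rw [← hsplit]; simp
      have hrest_le : rest.length ≤ n := by
        have : rest.length ≤ bs.length := List.length_dropWhile_le _ _
        simp only [List.length_cons] at hl
        omega
      have hgroups : iawGroups (b :: bs) = (b, ts.length + 1) :: iawGroups rest := by
        rw [iawGroups]
      cases b with
      | false =>
        have hts' : ∀ x ∈ ts, x = false := hts
        have hstep : iawLoop w (false :: bs) i none aw = iawLoop w bs (i + 1) none aw := by
          simp only [iawLoop]
          rw [if_neg (by simp), if_neg (by simp)]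
        have hrun : iawLoop w bs (i + 1) none aw = iawLoop w rest (i + 1 + ts.length) none aw := by
          conv_lhs => rw [← hsplit]
          exact iawLoop_false_run w ts hts' rest (i + 1) aw
        have hih := ih rest hrest_le (i + 1 + ts.length) aw
        have hend : i + (((false :: bs).length : ℕ) : Int) = (i + 1 + ts.length) + rest.length := by
          simp only [List.length_cons]
          push_cast
          omega
        rw [hstep, hrun, hend, hih, hgroups]
        simp only [iawBGo]
        rw [if_neg (by simp)]
        simp only [List.nil_append]
        congr 2
        push_cast
        ring
      | true =>
        have hts' : ∀ x ∈ ts, x = true := hts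
        have hstep : iawLoop w (true :: bs) i none aw = iawLoop w bs (i + 1) (some i) aw := by
          simp only [iawLoop]
          rw [if_pos (by simp)]
        have hrun : iawLoop w bs (i + 1) (some i) aw = iawLoop w rest (i + 1 + ts.length) (some i) aw := by
          conv_lhs => rw [← hsplit]
          exact iawLoop_true_run w ts hts' rest (i + 1) i aw
        match hre : rest, hrest_def with
        | [], _ =>
          -- trailing True run: A's post-loop check fires.
          have hbs : bs = ts := by simpa using hsplit.symm
          have hend : i + (((true :: bs).length : ℕ) : Int) = i + 1 + (ts.length : Int) := by
            simp only [hbs, List.length_cons]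
            push_cast
            ring
          rw [hstep, hrun]
          simp only [iawLoop, iawFinish, hgroups, iawBGo, iawGroups]
          rw [hend]
          by_cases hge : ((ts.length : Int) + 1) ≥ w
          · rw [if_pos (by omega), if_pos (by refine ⟨trivial, ?_⟩; push_cast; omega)]
            simp only [List.append_nil]
            congr 3
            push_cast
            ring
          · rw [if_neg (by omega), if_neg (by push_cast; omega)]
            simp
        | f :: r, hfr =>
          -- the True run is followed by a False flag; A closes the window there.
          have hf : f = false := by
            have := head_dropWhile_false (· == true) bs f r hfr.symm
            simpa using this
          subst hf
          -- one step on f from (some i), then un-step on f from none: both land in the same state.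
          have haw' :
              iawLoop w ((false : Bool) :: r) (i + 1 + ts.length) (some i) aw =
              iawLoop w ((false : Bool) :: r) (i + 1 + ts.length)
                none (if (i + 1 + ts.length) - i ≥ w then aw ++ [(i, i + 1 + ts.length)] else aw) := by
            simp [iawLoop]
          have hih := ih ((false : Bool) :: r) hrest_le (i + 1 + ts.length)
            (if (i + 1 + ts.length) - i ≥ w then aw ++ [(i, i + 1 + ts.length)] else aw)
          have hend : i + (((true :: bs).length : ℕ) : Int)
              = (i + 1 + ts.length) + ((((false : Bool) :: r).length : ℕ) : Int) := by
            have h2 : ts.length + (r.length + 1) = bs.length := by simpa using hlen_bs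
            simp only [List.length_cons]
            push_cast
            omega
          rw [hstep, hrun, haw', hend, hih, hgroups]
          simp only [iawBGo]
          by_cases hge : ((ts.length : Int) + 1) ≥ w
          · rw [if_pos (by omega), if_pos (by refine ⟨trivial, ?_⟩; push_cast; omega)]
            have h1 : i + 1 + (ts.length : Int) = i + ((ts.length + 1 : ℕ) : Int) := by push_cast; ring
            rw [h1]
            simp [List.append_assoc]
          · rw [if_neg (by omega), if_neg (by push_cast; omega)]
            have h1 : i + 1 + (ts.length : Int) = i + ((ts.length + 1 : ℕ) : Int) := by push_cast; ring
            rw [h1]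
            simp

-- ===== VERDICT (by name: the statement is the Claim_ definition above) =====
theorem identify_anomaly_windows_spec : Claim_equal_identify_anomaly_windows := by
  intro anomalies window_size _
  unfold Spec_identify_anomaly_windows identify_anomaly_windows identify_anomaly_windows_alt
  have h := iaw_main window_size anomalies.length anomalies le_rfl 0 []
  simp only [zero_add, List.nil_append] at h
  rw [← h]
  unfold iawFinish
  rcases iawLoop window_size anomalies 0 none [] with ⟨aw, st⟩
  cases st <;> simp
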